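-- pv_equiv track=rewrite | github.com/jim2832/algo_HW | algo_hw5/algo_hw5(2).py | find_nearest_repeated_word
-- ===== SOURCE A (Python) =====
-- def find_nearest_repeated_word(s):
--     #檢查list中的元素是否重複
--     set_list = set(s)
--     if len(set_list)==len(s):
--         return -1
--
--     #輸出最靠近重複元素之最短距離
--     m = 0
--     res = []
--     for idx1,word1 in enumerate(s):
--         for idx2,word2 in enumerate(s):
--             if word1 == word2:
--                 if idx1 != idx2:
--                     dist = abs(idx2 - idx1)
--                     res.append(dist) #將距離加入至list
--                     m = min(res) #令m為list中之最小值
--     return m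
-- ===== SOURCE B (Python) =====
-- def find_nearest_repeated_word(s):
--     last = {}
--     best = None
--     for i, w in enumerate(s):
--         if w in last:
--             d = i - last[w]
--             best = d if best is None else min(best, d)
--         last[w] = i
--     return -1 if best is None else best
-- ===== Notes on version B (the rewrite author's own statement) =====
-- stated objective: faster
-- what changed: B replaces A's O(n^2) all-pairs nested scan (which also rebuilds min(res) after every append) by a single pass that keeps each word's last-seen index in a dict and tracks the minimum gap.
import Mathlib
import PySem

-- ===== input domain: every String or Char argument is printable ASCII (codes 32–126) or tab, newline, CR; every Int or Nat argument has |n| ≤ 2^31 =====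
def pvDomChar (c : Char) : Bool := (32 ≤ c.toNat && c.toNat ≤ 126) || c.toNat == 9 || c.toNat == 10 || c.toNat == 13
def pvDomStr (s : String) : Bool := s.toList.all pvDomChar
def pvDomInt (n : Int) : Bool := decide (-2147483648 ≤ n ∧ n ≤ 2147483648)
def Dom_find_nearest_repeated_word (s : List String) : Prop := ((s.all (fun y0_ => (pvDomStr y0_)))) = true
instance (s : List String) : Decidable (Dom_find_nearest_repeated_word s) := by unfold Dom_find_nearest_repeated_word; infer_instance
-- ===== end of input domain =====

-- B replaces A's quadratic all-pairs distance scan by a single pass that keeps the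
-- last-seen index of each word in a dict and tracks the minimum gap (objective: faster).

-- ===== PORT A =====
def find_nearest_repeated_word (s : List String) : Int :=
  let set_list := PySem.Set.ofList s
  if set_list.length = s.length then -1
  else
    let st :=
      (PySem.List.enumerate s).foldl (fun (acc : Int × List Int) p =>
        (PySem.List.enumerate s).foldl (fun (acc : Int × List Int) q =>
          if p.2 = q.2 then
            if p.1 ≠ q.1 then
              let dist := |q.1 - p.1|
              let res := acc.2 ++ [dist]
              ((PySem.List.min? res (fun x => x)).getD 0, res)
            else acc
          else acc) acc) (0, [])
    st.1

-- ===== PORT B =====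
def find_nearest_repeated_word_alt (s : List String) : Int :=
  let st :=
    (PySem.List.enumerate s).foldl
      (fun (acc : Option Int × PySem.Dict String Int) p =>
        match acc.2.get? p.2 with
        | some j =>
          let d := p.1 - j
          (some (match acc.1 with | none => d | some b => min b d), acc.2.insert p.2 p.1)
        | none => (acc.1, acc.2.insert p.2 p.1))
      (none, PySem.Dict.empty)
  match st.1 with
  | none => -1
  | some b => b

-- ===== PRECONDITION & SPEC =====
def Spec_find_nearest_repeated_word (s : List String) (out : Int) : Prop := out = find_nearest_repeated_word_alt s
instance (s : List String) (out : Int) : Decidable (Spec_find_nearest_repeated_word s out) := by unfold Spec_find_nearest_repeated_word; infer_instance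

-- ===== CLAIM (what is proved, stated in full; the proofs are below) =====
def Claim_equal_find_nearest_repeated_word : Prop := ∀ (s : List String), Dom_find_nearest_repeated_word s → Spec_find_nearest_repeated_word s (find_nearest_repeated_word s)

-- ===== LEMMAS AND PROOFS =====

-- k is the LAST index before position m at which w occurs in s
def IsLastOcc (s : List String) (m : Nat) (w : String) (k : Nat) : Prop :=
  k < m ∧ s[k]? = some w ∧ ∀ l, k < l → l < m → s[l]? ≠ some w

-- the gaps B's pass finds, as a recursion over the remaining suffix
def gapsAux (seen : PySem.Dict String Int) (i : Int) : List String → List Int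
  | [] => []
  | w :: t =>
    match seen.get? w with
    | some j => (i - j) :: gapsAux (seen.insert w i) (i + 1) t
    | none => gapsAux (seen.insert w i) (i + 1) t

def gaps (s : List String) : List Int := gapsAux PySem.Dict.empty 0 s

-- inner-loop distances for a fixed outer pair p, and the whole collected list
def dists (s : List String) (p : Int × String) : List Int :=
  (PySem.List.enumerate s).filterMap (fun q =>
    if p.2 = q.2 ∧ p.1 ≠ q.1 then some |q.1 - p.1| else none)

def allD (s : List String) : List Int :=
  (PySem.List.enumerate s).flatMap (dists s)

-- Python min(res) (PySem, identity key) agrees with Mathlib's List.min? on Int lists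
theorem pymin_eq (l : List Int) : PySem.List.min? l (fun x => x) = l.min? := by
  cases l with
  | nil => rfl
  | cons x t => rw [PySem.List.min?_id_cons, List.min?_cons']

-- ---------- A-side characterization ----------

def Astep (p : Int × String) (acc : Int × List Int) (q : Int × String) : Int × List Int :=
  if p.2 = q.2 then
    if p.1 ≠ q.1 then
      let dist := |q.1 - p.1|
      let res := acc.2 ++ [dist]
      ((PySem.List.min? res (fun x => x)).getD 0, res)
    else acc
  else acc

def AInv (acc : Int × List Int) : Prop :=
  (acc.2 = [] ∧ acc.1 = 0) ∨ acc.1 = (acc.2.min?).getD 0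

theorem Astep_snd (p : Int × String) (l : List (Int × String)) : ∀ (acc : Int × List Int),
    (l.foldl (Astep p) acc).2 = acc.2 ++ l.filterMap (fun q =>
      if p.2 = q.2 ∧ p.1 ≠ q.1 then some |q.1 - p.1| else none) := by
  induction l with
  | nil => simp
  | cons q t ih =>
    intro acc
    simp only [List.foldl_cons, List.filterMap_cons, ih]
    unfold Astep
    split_ifs with h1 h2 <;> simp_all

theorem AInv_fold (p : Int × String) (l : List (Int × String)) : ∀ (acc : Int × List Int),
    AInv acc → AInv (l.foldl (Astep p) acc) := by
  induction l with
  | nil => exact fun _ h => h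
  | cons q t ih =>
    intro acc hacc
    refine ih _ ?_
    unfold Astep
    split_ifs with h1 h2
    · right
      simp [pymin_eq]
    · exact hacc
    · exact hacc

theorem Aouter_snd (s : List String) (l : List (Int × String)) : ∀ (acc : Int × List Int),
    ((l.foldl (fun acc p => (PySem.List.enumerate s).foldl (Astep p) acc) acc).2
      = acc.2 ++ l.flatMap (dists s)) := by
  induction l with
  | nil => simp
  | cons p t ih =>
    intro acc
    simp only [List.foldl_cons, List.flatMap_cons, ih, Astep_snd]
    simp [dists]

theorem AInv_outer (s : List String) (l : List (Int × String)) : ∀ (acc : Int × List Int),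
    AInv acc → AInv (l.foldl (fun acc p => (PySem.List.enumerate s).foldl (Astep p) acc) acc) := by
  induction l with
  | nil => exact fun _ h => h
  | cons p t ih =>
    intro acc hacc
    exact ih _ (AInv_fold p _ _ hacc)

theorem ofList_append_singleton (xs : List String) (x : String) :
    PySem.Set.ofList (xs ++ [x]) = PySem.Set.add (PySem.Set.ofList xs) x := by
  rw [PySem.Set.ofList_eq_foldl, PySem.Set.ofList_eq_foldl, List.foldl_append]
  rfl

theorem ofList_sublist (xs : List String) : (PySem.Set.ofList xs).Sublist xs := by
  induction xs using List.reverseRecOn with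
  | nil => simp [PySem.Set.ofList]
  | append_singleton t x ih =>
    rw [ofList_append_singleton]
    unfold PySem.Set.add
    split_ifs
    · exact ih.trans (List.sublist_append_left t [x])
    · exact ih.append_right [x]

theorem guard_iff (s : List String) : (PySem.Set.ofList s).length = s.length ↔ s.Nodup := by
  constructor
  · intro h
    have := (ofList_sublist s).eq_of_length h
    rw [← this]
    exact PySem.Set.nodup_ofList s
  · intro h
    rw [PySem.Set.ofList_eq_self_of_nodup s h]

theorem allD_mem (s : List String) (d : Int) :
    d ∈ allD s ↔ ∃ i j : Nat, i < s.length ∧ j < s.length ∧ i ≠ j ∧ s[i]? = s[j]? ∧ d = |(j : Int) - (i : Int)| := by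
  constructor
  · intro hd
    rw [allD, List.mem_flatMap] at hd
    obtain ⟨p, hp, hdp⟩ := hd
    rw [PySem.List.mem_enumerate_iff] at hp
    obtain ⟨i, hi, rfl⟩ := hp
    rw [dists, List.mem_filterMap] at hdp
    obtain ⟨q, hq, hdq⟩ := hdp
    rw [PySem.List.mem_enumerate_iff] at hq
    obtain ⟨j, hj, rfl⟩ := hq
    simp only [zero_add] at hdq ⊢
    split_ifs at hdq with hc
    · obtain ⟨hc1, hc2⟩ := hc
      refine ⟨i, j, hi, hj, ?_, ?_, ?_⟩
      · intro he; exact hc2 (by exact_mod_cast he)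
      · simp [hi, hj, hc1]
      · exact (Option.some_injective _ hdq).symm
  · rintro ⟨i, j, hi, hj, hne, heq, rfl⟩
    rw [allD, List.mem_flatMap]
    refine ⟨((i : Int), s[i]), ?_, ?_⟩
    · rw [PySem.List.mem_enumerate_iff]
      exact ⟨i, hi, by simp⟩
    · rw [dists, List.mem_filterMap]
      refine ⟨((j : Int), s[j]), ?_, ?_⟩
      · rw [PySem.List.mem_enumerate_iff]
        exact ⟨j, hj, by simp⟩
      · have hsij : s[i] = s[j] := by
          have h1 : s[i]? = some s[i] := List.getElem?_eq_getElem hi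
          have h2 : s[j]? = some s[j] := List.getElem?_eq_getElem hj
          rw [h1, h2] at heq
          exact Option.some_injective _ heq
        have hne' : (i : Int) ≠ (j : Int) := by exact_mod_cast hne
        simp [hsij, hne']

theorem A_eq (s : List String) :
    find_nearest_repeated_word s = if s.Nodup then -1 else ((allD s).min?).getD 0 := by
  by_cases h : s.Nodup
  · rw [if_pos h]
    rw [find_nearest_repeated_word]
    simp only [(guard_iff s).2 h, if_true]
  · rw [if_neg h]
    rw [find_nearest_repeated_word]
    have hg : ¬ (PySem.Set.ofList s).length = s.length := fun hh => h ((guard_iff s).1 hh)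
    simp only [hg, if_false]
    have hfold : ((PySem.List.enumerate s).foldl
        (fun acc p => (PySem.List.enumerate s).foldl (Astep p) acc) ((0 : Int), ([] : List Int)))
        = ((PySem.List.enumerate s).foldl
        (fun (acc : Int × List Int) p =>
          (PySem.List.enumerate s).foldl (fun (acc : Int × List Int) q =>
            if p.2 = q.2 then
              if p.1 ≠ q.1 then
                let dist := |q.1 - p.1|
                let res := acc.2 ++ [dist]
                ((PySem.List.min? res (fun x => x)).getD 0, res)
              else acc
            else acc) acc) ((0 : Int), ([] : List Int))) := rfl
    have hsnd := Aouter_snd s (PySem.List.enumerate s) ((0 : Int), ([] : List Int))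
    have hinv := AInv_outer s (PySem.List.enumerate s) ((0 : Int), ([] : List Int)) (Or.inl ⟨rfl, rfl⟩)
    rw [← hfold] at *
    set st := (PySem.List.enumerate s).foldl
      (fun acc p => (PySem.List.enumerate s).foldl (Astep p) acc) ((0 : Int), ([] : List Int)) with hst
    show st.1 = ((allD s).min?).getD 0
    simp only [List.nil_append] at hsnd
    have hallne : allD s ≠ [] := by
      rw [List.nodup_iff_injective_getElem] at h
      simp only [Function.Injective] at h
      push Not at h
      obtain ⟨⟨i, hi⟩, ⟨j, hj⟩, hij, hne⟩ := h
      intro he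
      have : |(j : Int) - (i : Int)| ∈ allD s := by
        rw [allD_mem]
        exact ⟨i, j, hi, hj, fun hh => hne (by simp [hh]), by
          simp [hi, hj, hij], rfl⟩
      rw [he] at this
      exact absurd this (List.not_mem_nil)
    rcases hinv with ⟨h2, _⟩ | h1
    · rw [hsnd] at h2; exact absurd h2 hallne
    · rw [h1, hsnd]; rfl

-- ---------- B-side characterization ----------

def Bstep (acc : Option Int × PySem.Dict String Int) (p : Int × String) :
    Option Int × PySem.Dict String Int :=
  match acc.2.get? p.2 with
  | some j =>
    let d := p.1 - j
    (some (match acc.1 with | none => d | some b => min b d), acc.2.insert p.2 p.1)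
  | none => (acc.1, acc.2.insert p.2 p.1)

theorem Bfold (rest : List String) : ∀ (i : Int) (best : Option Int) (seen : PySem.Dict String Int),
    ((PySem.List.enumerate rest i).foldl Bstep (best, seen)).1
      = (best.toList ++ gapsAux seen i rest).min? := by
  induction rest with
  | nil =>
    intro i best seen
    cases best <;> simp [PySem.List.enumerate, gapsAux]
  | cons w t ih =>
    intro i best seen
    rw [PySem.List.enumerate_cons, List.foldl_cons]
    show ((PySem.List.enumerate t (i + 1)).foldl Bstep (Bstep (best, seen) (i, w))).1
      = (best.toList ++ gapsAux seen i (w :: t)).min?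
    rw [gapsAux]
    cases hw : seen.get? w with
    | some j =>
      have hstep : Bstep (best, seen) (i, w)
          = (some (match best with | none => i - j | some b => min b (i - j)), seen.insert w i) := by
        simp only [Bstep, hw]
      rw [hstep, ih]
      cases best with
      | none => simp
      | some b =>
        simp only [Option.toList_some, List.cons_append]
        rw [List.min?_cons', List.min?_cons', List.nil_append (as := (i - j) :: _), List.foldl_cons,
          List.nil_append]
    | none =>
      have hstep : Bstep (best, seen) (i, w) = (best, seen.insert w i) := by
        simp [Bstep, hw]
      rw [hstep, ih]

theorem B_eq (s : List String) :
    find_nearest_repeated_word_alt s = match (gaps s).min? with | none => -1 | some b => b := by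
  rw [find_nearest_repeated_word_alt]
  have h := Bfold s 0 none PySem.Dict.empty
  simp only [Option.toList_none, List.nil_append] at h
  show (match ((PySem.List.enumerate s).foldl Bstep (none, PySem.Dict.empty)).1 with
      | none => (-1 : Int) | some b => b) = _
  rw [h]
  rfl

-- ---------- the mathematical core ----------

theorem IsLastOcc_unique {s : List String} {m : Nat} {w : String} {k k' : Nat}
    (h : IsLastOcc s m w k) (h' : IsLastOcc s m w k') : k = k' := by
  obtain ⟨hk, hsk, hmax⟩ := h
  obtain ⟨hk', hsk', hmax'⟩ := h'
  rcases Nat.lt_trichotomy k k' with hlt | heq | hgt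
  · exact absurd hsk' (hmax k' hlt hk')
  · exact heq
  · exact absurd hsk (hmax' k hgt hk)

theorem exists_lastOcc {s : List String} {i0 j : Nat} {w : String}
    (hij : i0 < j) (_hj : j < s.length) (hw : s[i0]? = some w) :
    ∃ k, i0 ≤ k ∧ IsLastOcc s j w k := by
  classical
  let P : Nat → Prop := fun k => s[k]? = some w
  have hi0 : i0 ≤ j - 1 := by omega
  have hPi0 : P i0 := hw
  refine ⟨Nat.findGreatest P (j - 1), Nat.le_findGreatest hi0 hPi0, ?_, ?_, ?_⟩
  · have := Nat.findGreatest_le (P := P) (j - 1)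
    omega
  · exact Nat.findGreatest_spec (P := P) hi0 hPi0
  · intro l hl hlj hws
    exact (Nat.findGreatest_is_greatest (P := P) hl (by omega)) hws

theorem gapsAux_mem (s : List String) : ∀ (rest : List String) (i : Nat) (seen : PySem.Dict String Int),
    s.drop i = rest →
    (∀ (w : String) (j : Int), seen.get? w = some j ↔ ∃ k : Nat, j = (k : Int) ∧ IsLastOcc s i w k) →
    ∀ g, g ∈ gapsAux seen (i : Int) rest ↔
      ∃ j k : Nat, i ≤ j ∧ j < s.length ∧ ∃ w, s[j]? = some w ∧ IsLastOcc s j w k ∧ g = (j : Int) - (k : Int) := by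
  intro rest
  induction rest with
  | nil =>
    intro i seen hdrop _ g
    have hlen : s.length ≤ i := by
      rw [List.drop_eq_nil_iff] at hdrop
      exact hdrop
    simp only [gapsAux, List.not_mem_nil, false_iff]
    rintro ⟨j, k, hij, hjl, -⟩
    omega
  | cons w t ih =>
    intro i seen hdrop hseen g
    have hi : i < s.length := by
      by_contra hc
      rw [List.drop_eq_nil_iff.2 (by omega)] at hdrop
      simp at hdrop
    have hsw : s[i]? = some w := by
      have h0 : (s.drop i)[0]? = some w := by rw [hdrop]; rfl
      rwa [List.getElem?_drop, Nat.add_zero] at h0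
    have hdt : s.drop (i + 1) = t := by
      have : s.drop (i + 1) = (s.drop i).drop 1 := by rw [List.drop_drop, Nat.add_comm]
      rw [this, hdrop]; rfl
    -- the updated dict is the last-occurrence table for the longer prefix
    have hlast_i : IsLastOcc s (i + 1) w i := ⟨Nat.lt_succ_self i, hsw, fun l h1 h2 => by omega⟩
    have hins : ∀ (w' : String) (j : Int),
        (seen.insert w i).get? w' = some j ↔ ∃ k : Nat, j = (k : Int) ∧ IsLastOcc s (i + 1) w' k := by
      intro w' j
      rw [PySem.Dict.get?_insert]
      by_cases hww : w' = w
      · rw [if_pos hww]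
        subst hww
        constructor
        · intro hj
          exact ⟨i, (Option.some_injective _ hj).symm, hlast_i⟩
        · rintro ⟨k, rfl, hk⟩
          rw [IsLastOcc_unique hk hlast_i]
      · rw [if_neg hww, hseen]
        have hiff : ∀ k : Nat, IsLastOcc s i w' k ↔ IsLastOcc s (i + 1) w' k := by
          intro k
          constructor
          · rintro ⟨h1, h2, h3⟩
            refine ⟨by omega, h2, fun l hl1 hl2 => ?_⟩
            rcases Nat.lt_or_ge l i with hli | hli
            · exact h3 l hl1 hli
            · have : l = i := by omega
              subst this
              rw [hsw]
              intro hc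
              exact hww (Option.some_injective _ hc).symm
          · rintro ⟨h1, h2, h3⟩
            have hki : k ≠ i := by
              intro hc; subst hc
              rw [hsw] at h2
              exact hww (Option.some_injective _ h2).symm
            exact ⟨by omega, h2, fun l hl1 hl2 => h3 l hl1 (by omega)⟩
        constructor
        · rintro ⟨k, rfl, hk⟩; exact ⟨k, rfl, (hiff k).1 hk⟩
        · rintro ⟨k, rfl, hk⟩; exact ⟨k, rfl, (hiff k).2 hk⟩
    have ihspec := ih (i + 1) (seen.insert w i) hdt hins
    rw [gapsAux]
    cases hws : seen.get? w with
    | some j =>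
      obtain ⟨k0, rfl, hk0⟩ := (hseen w j).1 hws
      simp only [List.mem_cons]
      constructor
      · rintro (rfl | hg)
        · exact ⟨i, k0, le_refl i, hi, w, hsw, hk0, rfl⟩
        · have := (ihspec g).1 (by exact_mod_cast hg)
          obtain ⟨j', k', h1, h2, hrest⟩ := this
          exact ⟨j', k', by omega, h2, hrest⟩
      · rintro ⟨j', k', hij', hj', w', hsw', hlo, rfl⟩
        rcases Nat.eq_or_lt_of_le hij' with heq | hlt
        · subst heq
          have hww' : w' = w := Option.some_injective _ (hsw'.symm.trans hsw)
          rw [hww'] at hlo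
          left
          rw [IsLastOcc_unique hlo hk0]
        · right
          have : ((j' : Int) - (k' : Int)) ∈ gapsAux (seen.insert w i) ((i : Int) + 1) t := by
            have := (ihspec ((j' : Int) - (k' : Int))).2 ⟨j', k', by omega, hj', w', hsw', hlo, rfl⟩
            exact_mod_cast this
          exact this
    | none =>
      constructor
      · intro hg
        have := (ihspec g).1 (by exact_mod_cast hg)
        obtain ⟨j', k', h1, h2, hrest⟩ := this
        exact ⟨j', k', by omega, h2, hrest⟩
      · rintro ⟨j', k', hij', hj', w', hsw', hlo, rfl⟩
        rcases Nat.eq_or_lt_of_le hij' with heq | hlt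
        · subst heq
          have hww' : w' = w := Option.some_injective _ (hsw'.symm.trans hsw)
          rw [hww'] at hlo
          have := (hseen w (k' : Int)).2 ⟨k', rfl, hlo⟩
          rw [hws] at this
          simp at this
        · have : ((j' : Int) - (k' : Int)) ∈ gapsAux (seen.insert w i) ((i : Int) + 1) t := by
            have := (ihspec ((j' : Int) - (k' : Int))).2 ⟨j', k', by omega, hj', w', hsw', hlo, rfl⟩
            exact_mod_cast this
          exact this

theorem gaps_mem (s : List String) (g : Int) :
    g ∈ gaps s ↔ ∃ j k : Nat, j < s.length ∧ ∃ w, s[j]? = some w ∧ IsLastOcc s j w k ∧ g = (j : Int) - (k : Int) := by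
  have hempty : ∀ (w : String) (j : Int),
      (PySem.Dict.empty : PySem.Dict String Int).get? w = some j ↔
        ∃ k : Nat, j = (k : Int) ∧ IsLastOcc s 0 w k := by
    intro w j
    constructor
    · intro h
      simp [PySem.Dict.empty, PySem.Dict.get?] at h
    · rintro ⟨k, -, hk, -⟩
      omega
  have h := gapsAux_mem s s 0 PySem.Dict.empty (List.drop_zero) hempty g
  rw [Nat.cast_zero] at h
  rw [gaps, h]
  constructor
  · rintro ⟨j, k, -, hj, hrest⟩; exact ⟨j, k, hj, hrest⟩
  · rintro ⟨j, k, hj, hrest⟩; exact ⟨j, k, Nat.zero_le j, hj, hrest⟩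

theorem gaps_subset_allD (s : List String) : ∀ g ∈ gaps s, g ∈ allD s := by
  intro g hg
  rw [gaps_mem] at hg
  obtain ⟨j, k, hj, w, hsw, ⟨hkj, hsk, -⟩, rfl⟩ := hg
  rw [allD_mem]
  refine ⟨k, j, by omega, hj, by omega, by rw [hsk, hsw], ?_⟩
  rw [abs_of_nonneg (by omega)]

theorem allD_dominated (s : List String) : ∀ d ∈ allD s, ∃ g ∈ gaps s, g ≤ d := by
  intro d hd
  rw [allD_mem] at hd
  obtain ⟨i, j, hi, hj, hne, heq, rfl⟩ := hd
  rcases Nat.lt_or_gt_of_ne hne with hij | hij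
  · -- i < j : the gap ending at j is at most j - i = |j - i|
    have hsj : s[j]? = some s[j] := List.getElem?_eq_getElem hj
    have hsi : s[i]? = some s[j] := heq.trans hsj
    obtain ⟨k, hik, hlast⟩ := exists_lastOcc hij hj hsi
    refine ⟨(j : Int) - (k : Int), ?_, ?_⟩
    · rw [gaps_mem]
      exact ⟨j, k, hj, s[j], hsj, hlast, rfl⟩
    · rw [abs_of_nonneg (by omega)]
      omega
  · -- j < i : the gap ending at i is at most i - j = |j - i|
    have hsi : s[i]? = some s[i] := List.getElem?_eq_getElem hi
    have hsj : s[j]? = some s[i] := heq.symm.trans hsi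
    obtain ⟨k, hjk, hlast⟩ := exists_lastOcc hij hi hsj
    refine ⟨(i : Int) - (k : Int), ?_, ?_⟩
    · rw [gaps_mem]
      exact ⟨i, k, hi, s[i], hsi, hlast, rfl⟩
    · rw [abs_of_nonpos (by omega)]
      omega

theorem min?_eq (s : List String) : (allD s).min? = (gaps s).min? := by
  cases hg : (gaps s).min? with
  | none =>
    rw [List.min?_eq_none_iff] at hg ⊢
    rw [List.eq_nil_iff_forall_not_mem]
    intro d hd
    obtain ⟨g, hgm, -⟩ := allD_dominated s d hd
    rw [hg] at hgm
    exact List.not_mem_nil hgm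
  | some b =>
    have hbmem : b ∈ gaps s := List.min?_mem hg
    have hble : ∀ x ∈ gaps s, b ≤ x := by
      intro x hx
      rw [List.min?_eq_some_iff] at hg
      exact hg.2 x hx
    cases ha : (allD s).min? with
    | none =>
      rw [List.min?_eq_none_iff] at ha
      have := gaps_subset_allD s b hbmem
      rw [ha] at this
      exact absurd this List.not_mem_nil
    | some a =>
      have hamem : a ∈ allD s := List.min?_mem ha
      have hale : ∀ x ∈ allD s, a ≤ x := by
        intro x hx
        rw [List.min?_eq_some_iff] at ha
        exact ha.2 x hx
      have h1 : a ≤ b := hale b (gaps_subset_allD s b hbmem)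
      have h2 : b ≤ a := by
        obtain ⟨g, hgm, hga⟩ := allD_dominated s a hamem
        exact le_trans (hble g hgm) hga
      rw [le_antisymm h1 h2]

theorem nodup_iff_allD (s : List String) : s.Nodup ↔ allD s = [] := by
  constructor
  · intro h
    rw [List.eq_nil_iff_forall_not_mem]
    intro d hd
    rw [allD_mem] at hd
    obtain ⟨i, j, hi, hj, hne, heq, -⟩ := hd
    rw [List.nodup_iff_injective_getElem] at h
    have : s[i] = s[j] := by
      have h1 : s[i]? = some s[i] := List.getElem?_eq_getElem hi
      have h2 : s[j]? = some s[j] := List.getElem?_eq_getElem hj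
      rw [h1, h2] at heq
      exact Option.some_injective _ heq
    have := h (a₁ := ⟨i, hi⟩) (a₂ := ⟨j, hj⟩) this
    exact hne (congrArg Fin.val this)
  · intro h
    by_contra hc
    rw [List.nodup_iff_injective_getElem] at hc
    simp only [Function.Injective] at hc
    push Not at hc
    obtain ⟨⟨i, hi⟩, ⟨j, hj⟩, hij, hne⟩ := hc
    have : |(j : Int) - (i : Int)| ∈ allD s := by
      rw [allD_mem]
      exact ⟨i, j, hi, hj, fun hh => hne (by simp [hh]), by simp [hi, hj, hij], rfl⟩
    rw [h] at this
    exact List.not_mem_nil this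

theorem find_nearest_repeated_word_spec : Claim_equal_find_nearest_repeated_word := by
  intro s _
  unfold Spec_find_nearest_repeated_word
  rw [A_eq, B_eq, ← min?_eq]
  by_cases h : s.Nodup
  · rw [if_pos h]
    have : allD s = [] := (nodup_iff_allD s).1 h
    simp [this]
  · rw [if_neg h]
    have hne : allD s ≠ [] := fun he => h ((nodup_iff_allD s).2 he)
    cases hm : (allD s).min? with
    | none => exact absurd (List.min?_eq_none_iff.1 hm) hne
    | some b => rfl
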